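-- pv_equiv track=rewrite | github.com/frenetic-lang/slices | updates/netcore_compiler.py | pattern_is_subset
-- ===== SOURCE A (Python) =====
-- def pattern_is_subset(smaller, larger):
--     '''
--     Determine if all packets that match smaller will also match larger.
--     '''
--     assert(isinstance(smaller, type({})))
--     assert(isinstance(larger, type({})))
--
--     # TODO: handle wildcards
--     for k in smaller:
--         if k in larger and larger[k] != smaller[k]:
--             return False
--     for k in larger:
--         if k not in smaller:
--             return False
--     return True
-- ===== SOURCE B (Python) =====
-- def pattern_is_subset(smaller, larger):
--     '''
--     Determine if all packets that match smaller will also match larger.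
--     '''
--     assert(isinstance(smaller, type({})))
--     assert(isinstance(larger, type({})))
--
--     # Single pass: larger's keys must all appear in smaller with equal values.
--     for k in larger:
--         if k not in smaller or smaller[k] != larger[k]:
--             return False
--     return True
-- ===== Notes on version B (the rewrite author's own statement) =====
-- stated objective: simpler
-- what changed: Replaces A's two sequential loops (value-conflict scan over smaller, then key-containment scan over larger) with one fused pass over larger that checks membership and value equality together.
import Mathlib
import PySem

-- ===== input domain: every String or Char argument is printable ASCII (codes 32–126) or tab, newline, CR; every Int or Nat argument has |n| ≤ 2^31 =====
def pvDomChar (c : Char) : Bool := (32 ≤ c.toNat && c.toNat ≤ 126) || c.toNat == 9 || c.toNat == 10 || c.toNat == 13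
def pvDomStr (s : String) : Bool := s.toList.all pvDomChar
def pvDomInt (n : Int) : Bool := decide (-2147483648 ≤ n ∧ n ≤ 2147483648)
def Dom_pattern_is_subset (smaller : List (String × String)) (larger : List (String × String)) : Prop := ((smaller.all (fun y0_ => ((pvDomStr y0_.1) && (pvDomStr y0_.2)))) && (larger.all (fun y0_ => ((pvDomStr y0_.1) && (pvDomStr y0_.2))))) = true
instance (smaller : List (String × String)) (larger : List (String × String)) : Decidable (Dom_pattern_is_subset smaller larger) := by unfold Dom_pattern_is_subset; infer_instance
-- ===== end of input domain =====

-- B fuses A's two sequential loops into one pass over larger (same result; objective: simpler).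

-- ===== PORT A =====
-- dict lookup (first match in the association list)
def pvGetPIS : List (String × String) → String → Option String
  | [], _ => none
  | (k', v) :: rest, k => if k' == k then some v else pvGetPIS rest k

-- second loop of A: 'for k in larger: if k not in smaller: return False'
def pisLoop2 (smaller : List (String × String)) : List String → Bool
  | [] => true
  | k :: rest => if (pvGetPIS smaller k).isSome then pisLoop2 smaller rest else false

-- first loop of A: 'for k in smaller: if k in larger and larger[k] != smaller[k]: return False'
def pisLoop1 (smaller larger : List (String × String)) : List String → Bool
  | [] => pisLoop2 smaller (larger.map Prod.fst)
  | k :: rest =>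
      if (pvGetPIS larger k).isSome && pvGetPIS larger k != pvGetPIS smaller k then false
      else pisLoop1 smaller larger rest

def pattern_is_subset (smaller : List (String × String)) (larger : List (String × String)) : Bool :=
  pisLoop1 smaller larger (smaller.map Prod.fst)

-- ===== PORT B =====
-- single loop of B: 'for k in larger: if k not in smaller or smaller[k] != larger[k]: return False'
def pisAltLoop (smaller larger : List (String × String)) : List String → Bool
  | [] => true
  | k :: rest =>
      match pvGetPIS smaller k with
      | none => false
      | some v => if pvGetPIS larger k != some v then false else pisAltLoop smaller larger rest

def pattern_is_subset_alt (smaller : List (String × String)) (larger : List (String × String)) : Bool :=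
  pisAltLoop smaller larger (larger.map Prod.fst)

-- ===== PRECONDITION & SPEC =====
def Spec_pattern_is_subset (smaller : List (String × String)) (larger : List (String × String)) (out : Bool) : Prop := out = pattern_is_subset_alt smaller larger
instance (smaller : List (String × String)) (larger : List (String × String)) (out : Bool) : Decidable (Spec_pattern_is_subset smaller larger out) := by unfold Spec_pattern_is_subset; infer_instance

-- ===== CLAIM (what is proved, stated in full; the proofs are below) =====
def Claim_equal_pattern_is_subset : Prop := ∀ (smaller : List (String × String)) (larger : List (String × String)), Dom_pattern_is_subset smaller larger → Spec_pattern_is_subset smaller larger (pattern_is_subset smaller larger)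

-- ===== LEMMAS AND PROOFS =====
theorem pvGetPIS_isSome_iff (d : List (String × String)) (k : String) :
    (pvGetPIS d k).isSome = true ↔ k ∈ d.map Prod.fst := by
  induction d with
  | nil => simp [pvGetPIS]
  | cons p rest ih =>
      obtain ⟨k', v⟩ := p
      simp only [pvGetPIS, List.map_cons, List.mem_cons]
      by_cases h : k' == k
      · rw [if_pos h]; rw [beq_iff_eq] at h; simp [h]
      · rw [if_neg h]; rw [beq_iff_eq] at h; simp [ih, Ne.symm h]

theorem pisLoop2_eq_all (smaller : List (String × String)) (ks : List String) :
    pisLoop2 smaller ks = ks.all (fun k => (pvGetPIS smaller k).isSome) := by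
  induction ks with
  | nil => rfl
  | cons k rest ih => by_cases h : (pvGetPIS smaller k).isSome <;> simp [pisLoop2, h, ih]

theorem pisLoop1_eq (smaller larger : List (String × String)) (ks : List String) :
    pisLoop1 smaller larger ks =
      (ks.all (fun k => !((pvGetPIS larger k).isSome && pvGetPIS larger k != pvGetPIS smaller k))
        && pisLoop2 smaller (larger.map Prod.fst)) := by
  induction ks with
  | nil => simp [pisLoop1]
  | cons k rest ih =>
      simp only [pisLoop1, List.all_cons, ih]
      by_cases h : ((pvGetPIS larger k).isSome && pvGetPIS larger k != pvGetPIS smaller k) = true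
      · rw [if_pos h, h]; simp
      · rw [if_neg h]; rw [Bool.not_eq_true] at h; rw [h]; simp

theorem pisAltLoop_eq_all (smaller larger : List (String × String)) (ks : List String) :
    pisAltLoop smaller larger ks =
      ks.all (fun k => (pvGetPIS smaller k).isSome && pvGetPIS larger k == pvGetPIS smaller k) := by
  induction ks with
  | nil => rfl
  | cons k rest ih =>
      cases hs : pvGetPIS smaller k with
      | none => simp [pisAltLoop, hs]
      | some v =>
          by_cases h : pvGetPIS larger k = some v <;> simp [pisAltLoop, hs, h, ih]

theorem pattern_is_subset_spec : Claim_equal_pattern_is_subset := by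
  unfold Claim_equal_pattern_is_subset
  intro smaller larger _
  unfold Spec_pattern_is_subset pattern_is_subset pattern_is_subset_alt
  rw [pisLoop1_eq, pisLoop2_eq_all, pisAltLoop_eq_all]
  rcases h : (larger.map Prod.fst).all
      (fun k => (pvGetPIS smaller k).isSome && pvGetPIS larger k == pvGetPIS smaller k) with _ | _
  · -- B is false: some k in larger fails; show A's conjunction is false too
    rw [List.all_eq_false] at h
    obtain ⟨k, hk, hfail⟩ := h
    simp only [Bool.and_eq_false_iff, List.all_eq_false]
    by_cases hs : (pvGetPIS smaller k).isSome = true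
    · -- value mismatch at k; k is a key of smaller, so A's first loop catches it
      have hl : (pvGetPIS larger k).isSome = true := (pvGetPIS_isSome_iff larger k).mpr hk
      have hne : pvGetPIS larger k ≠ pvGetPIS smaller k := by
        intro he; rw [hs, he] at hfail; simp at hfail
      left
      exact ⟨k, (pvGetPIS_isSome_iff smaller k).mp hs, by simp [hl, hne]⟩
    · right; exact ⟨k, hk, by simp [hs]⟩
  · -- B is true: show both of A's conjuncts hold
    rw [List.all_eq_true] at h
    have hA : ∀ k ∈ larger.map Prod.fst,
        (pvGetPIS smaller k).isSome = true ∧ pvGetPIS larger k = pvGetPIS smaller k := by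
      intro k hk
      have := h k hk
      simp only [Bool.and_eq_true, beq_iff_eq] at this
      exact this
    simp only [Bool.and_eq_true, List.all_eq_true]
    refine ⟨fun k _ => ?_, fun k hk => ?_⟩
    · by_cases hl : (pvGetPIS larger k).isSome = true
      · have := (hA k ((pvGetPIS_isSome_iff larger k).mp hl)).2
        simp [this]
      · simp [hl]
    · exact (hA k hk).1
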